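-- pv_equiv track=rewrite | github.com/Jzhangsheffield/Multisensor-Data-Collection-and-Processing | Multi-sensor-data-collection-script-master/check_segmentation.py | normalize_segment_name
-- ===== SOURCE A (Python) =====
-- from typing import Dict, Set, Tuple, Optional, Iterable
--
-- def normalize_segment_name(
--     name: str,
--     remove_tokens: Optional[Iterable[str]] = None,
-- ) -> str:
--     """
--     统一片段文件夹名（做“命名层面”的对齐）：
--
--     参数
--     ----
--     name : str
--         原始片段文件夹名，比如：
--           run_4_clip_000012_mid_npy
--     remove_tokens : Iterable[str] | None
--         要去除的字样列表，例如：
--           ["_npy", "_mid", "_elbow", "_left", "_right"]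
--         - None 表示使用默认值 ["_npy"]
--
--     返回
--     ----
--     str
--         规范化后的片段名，比如：
--           run_4_clip_000012
--     """
--     if remove_tokens is None:
--         # 默认保持与你之前脚本一致：只去掉 _npy
--         remove_tokens = ["_npy"]
--
--     normalized = name
--
--     # 逐个删除 token（出现多次也会全部删掉）
--     for token in remove_tokens:
--         if token:  # 防止传入空字符串导致死循环或意外行为
--             normalized = normalized.replace(token, "")
--
--     # 清理可能产生的多余下划线，例如：run__4__clip -> run_4_clip
--     while "__" in normalized:
--         normalized = normalized.replace("__", "_")
--
--     # 清理首尾下划线：_run_1_ -> run_1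
--     normalized = normalized.strip("_")
--
--     return normalized
-- ===== SOURCE B (Python) =====
-- from typing import Optional, Iterable
--
-- def normalize_segment_name(
--     name: str,
--     remove_tokens: Optional[Iterable[str]] = None,
-- ) -> str:
--     if remove_tokens is None:
--         remove_tokens = ["_npy"]
--     normalized = name
--     for token in remove_tokens:
--         if token:
--             normalized = normalized.replace(token, "")
--     # split on underscores, drop empty pieces (collapses runs and trims ends), rejoin
--     parts = [p for p in normalized.split('_') if p]
--     return '_'.join(parts)
-- ===== Notes on version B (the rewrite author's own statement) =====
-- stated objective: idiomatic
-- what changed: The fixed-point while loop that repeatedly rescans the string collapsing doubled underscores, followed by stripping underscores at both ends, is replaced by one split on the underscore separator, a filter dropping empty pieces, and a join.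
import Mathlib
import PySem

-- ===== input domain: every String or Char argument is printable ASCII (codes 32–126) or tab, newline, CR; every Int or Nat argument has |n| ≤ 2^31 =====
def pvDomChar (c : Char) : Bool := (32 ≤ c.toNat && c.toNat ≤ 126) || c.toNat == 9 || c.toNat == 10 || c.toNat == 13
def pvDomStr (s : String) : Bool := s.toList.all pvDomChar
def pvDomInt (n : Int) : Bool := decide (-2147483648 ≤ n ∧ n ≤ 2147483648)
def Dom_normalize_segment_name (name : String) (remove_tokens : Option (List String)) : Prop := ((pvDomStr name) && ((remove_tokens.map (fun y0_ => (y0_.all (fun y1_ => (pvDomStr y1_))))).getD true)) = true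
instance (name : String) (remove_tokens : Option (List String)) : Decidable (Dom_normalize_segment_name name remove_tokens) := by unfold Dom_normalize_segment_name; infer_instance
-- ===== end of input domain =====

-- B replaces A's fixed-point while loop (collapse doubled underscores, then strip edge underscores) by split / drop-empty / join: same result, more idiomatic.


-- ===== PORT A =====
-- shared by both ports: the token-removal loop, identical in both Python sources
def pvTok (name : String) (tokens : List String) : String :=
  tokens.foldl (fun nm token => if token ≠ "" then PySem.Str.replace nm token "" else nm) name

-- proof-side model of the double-underscore collapse step, needed here for the while-loop's termination
def pvRep2 : List Char → List Char
  | [] => []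
  | c :: t =>
    if c = '_' ∧ t.head? = some '_' then '_' :: pvRep2 t.tail else c :: pvRep2 t
termination_by s => s.length
decreasing_by all_goals (simp [List.length_tail]; try omega)

theorem pvRep2_go (fuel : Nat) : ∀ (l acc : List Char), l.length ≤ fuel →
    PySem.Chars.replace.go ['_', '_'] ['_'] fuel l acc = acc.reverse ++ pvRep2 l := by
  induction fuel with
  | zero =>
    intro l acc h
    have hl : l = [] := by cases l <;> simp_all
    subst hl; simp [PySem.Chars.replace.go, pvRep2]
  | succ n ih =>
    intro l acc h
    match l with
    | [] => simp [PySem.Chars.replace.go, pvRep2]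
    | c :: t =>
      rw [PySem.Chars.replace.go]
      by_cases hp : List.isPrefixOf ['_', '_'] (c :: t) = true
      · cases t with
        | nil => simp [List.isPrefixOf] at hp
        | cons d t' =>
          have hcd : '_' = c ∧ '_' = d := by simpa [List.isPrefixOf] using hp
          obtain ⟨hc1, hd1⟩ := hcd; subst hc1; subst hd1
          simp only [hp, if_true]
          have hdrop : List.drop (['_', '_'] : List Char).length ('_' :: '_' :: t') = t' := by simp
          rw [hdrop, ih t' _ (by simp at h ⊢; omega)]
          rw [pvRep2]
          simp
      · simp only [hp, if_false]
        rw [ih t _ (by simp at h ⊢; omega)]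
        have hc : ¬ (c = '_' ∧ t.head? = some '_') := by
          rintro ⟨h1, h2⟩
          cases t with
          | nil => simp at h2
          | cons d t' =>
            simp at h2
            subst h1 h2
            simp [List.isPrefixOf] at hp
        rw [pvRep2]; simp [hc]

theorem pvRep2_eq (s : List Char) : PySem.Chars.replace s ['_', '_'] ['_'] = pvRep2 s := by
  rw [PySem.Chars.replace]
  simp only [List.isEmpty_cons, Bool.false_eq_true, if_false]
  exact pvRep2_go s.length s [] (le_refl _)

theorem pvRep2_len_le (s : List Char) : (pvRep2 s).length ≤ s.length := by
  induction s using pvRep2.induct with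
  | case1 => simp [pvRep2]
  | case2 c t h ih =>
    rw [pvRep2, if_pos h]
    simp only [List.length_cons]
    have h2 : t.tail.length ≤ t.length := by cases t <;> simp
    omega
  | case3 c t h ih => rw [pvRep2, if_neg h]; simp; omega

theorem pvRep2_len_lt (s : List Char) (h : ['_', '_'] <:+: s) : (pvRep2 s).length < s.length := by
  induction s using pvRep2.induct with
  | case1 => simp at h
  | case2 c t hc ih =>
    rw [pvRep2, if_pos hc]
    simp only [List.length_cons]
    have h3 := pvRep2_len_le t.tail
    have h2 : t.tail.length < t.length := by
      obtain ⟨_, hh⟩ := hc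
      cases t with
      | nil => simp at hh
      | cons d t' => simp
    omega
  | case3 c t hc ih =>
    rw [pvRep2, if_neg hc]; simp only [List.length_cons]
    have ht : ['_', '_'] <:+: t := by
      rcases List.infix_cons_iff.mp h with hpre | hinf
      · exfalso; apply hc
        rcases hpre with ⟨r, hr⟩
        cases t with
        | nil => simp at hr
        | cons d t' =>
          injection hr with e1 e2
          injection e2 with e3 _
          exact ⟨e1.symm, by simp [← e3]⟩
      · exact hinf
    have := ih ht; omega

theorem pvReplace_len_lt (s : List Char) (h : PySem.Chars.isIn ['_', '_'] s = true) :
    (PySem.Chars.replace s ['_', '_'] ['_']).length < s.length := by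
  rw [pvRep2_eq]
  exact pvRep2_len_lt s ((PySem.Chars.isIn_iff_infix _ _).mp h)

-- the while loop of A that collapses doubled underscores to a fixed point
def pvCollapse (s : List Char) : List Char :=
  if h : PySem.Chars.isIn ['_', '_'] s = true then
    pvCollapse (PySem.Chars.replace s ['_', '_'] ['_'])
  else s
termination_by s.length
decreasing_by exact pvReplace_len_lt s h

def normalize_segment_name (name : String) (remove_tokens : Option (List String)) : String :=
  let tokens := remove_tokens.getD ["_npy"]
  let normalized := pvTok name tokens
  let collapsed := String.ofList (pvCollapse normalized.toList)
  PySem.Str.stripChars collapsed "_"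

-- ===== PORT B =====
def normalize_segment_name_alt (name : String) (remove_tokens : Option (List String)) : String :=
  let tokens := remove_tokens.getD ["_npy"]
  let normalized := pvTok name tokens
  let parts := (PySem.Chars.splitOn normalized.toList ['_']).filter (fun p => !p.isEmpty)
  String.ofList (PySem.Chars.join ['_'] parts)

-- ===== PRECONDITION & SPEC =====
def Spec_normalize_segment_name (name : String) (remove_tokens : Option (List String)) (out : String) : Prop := out = normalize_segment_name_alt name remove_tokens
instance (name : String) (remove_tokens : Option (List String)) (out : String) : Decidable (Spec_normalize_segment_name name remove_tokens out) := by unfold Spec_normalize_segment_name; infer_instance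

-- ===== CLAIM (what is proved, stated in full; the proofs are below) =====
def Claim_equal_normalize_segment_name : Prop := ∀ (name : String) (remove_tokens : Option (List String)), Dom_normalize_segment_name name remove_tokens → Spec_normalize_segment_name name remove_tokens (normalize_segment_name name remove_tokens)

-- ===== LEMMAS AND PROOFS =====

-- proof-side model of splitting on the underscore separator
def pvSpl : List Char → List (List Char)
  | [] => [[]]
  | c :: t =>
    if c = '_' then [] :: pvSpl t
    else
      match pvSpl t with
      | p :: ps => (c :: p) :: ps
      | [] => [[c]]

theorem pvSpl_ne_nil (s : List Char) : pvSpl s ≠ [] := by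
  cases s with
  | nil => simp [pvSpl]
  | cons c t =>
    rw [pvSpl]
    split_ifs
    · simp
    · cases h : pvSpl t <;> simp

theorem pvSpl_go (fuel : Nat) : ∀ (l cur : List Char) (acc : List (List Char)), l.length ≤ fuel →
    PySem.Chars.splitOn.go ['_'] fuel l cur acc =
      acc.reverse ++ ((cur.reverse ++ (pvSpl l).headI) :: (pvSpl l).tail) := by
  induction fuel with
  | zero =>
    intro l cur acc h
    have hl : l = [] := by cases l <;> simp_all
    subst hl; simp [PySem.Chars.splitOn.go, pvSpl]
  | succ n ih =>
    intro l cur acc h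
    match l with
    | [] => simp [PySem.Chars.splitOn.go, pvSpl]
    | c :: t =>
      rw [PySem.Chars.splitOn.go]
      by_cases hc : c = '_'
      · subst hc
        have hp : List.isPrefixOf ['_'] ('_' :: t) = true := by simp [List.isPrefixOf]
        simp only [hp, if_true]
        have hdrop : List.drop (['_'] : List Char).length ('_' :: t) = t := by simp
        rw [hdrop, ih t [] _ (by simp at h ⊢; omega)]
        rw [pvSpl, if_pos rfl]
        cases hs : pvSpl t with
        | nil => exact absurd hs (pvSpl_ne_nil t)
        | cons p ps => simp [hs]
      · have hp : List.isPrefixOf ['_'] (c :: t) = false := by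
          simp [List.isPrefixOf]
          exact fun e => hc e.symm
        simp only [hp, Bool.false_eq_true, if_false]
        rw [ih t (c :: cur) acc (by simp at h ⊢; omega)]
        rw [pvSpl, if_neg hc]
        cases hs : pvSpl t with
        | nil => exact absurd hs (pvSpl_ne_nil t)
        | cons p ps => simp [hs]

theorem pvSplitOn_eq (s : List Char) : PySem.Chars.splitOn s ['_'] = pvSpl s := by
  rw [PySem.Chars.splitOn]
  rw [pvSpl_go (s.length + 1) s [] [] (by omega)]
  have := pvSpl_ne_nil s
  cases h : pvSpl s with
  | nil => exact absurd h this
  | cons p ps => simp [h]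

-- the word list: nonempty '_'-separated pieces
def pvWords : List Char → List (List Char)
  | [] => []
  | c :: t =>
    if c = '_' then pvWords t
    else (c :: t.takeWhile (· ≠ '_')) :: pvWords (t.dropWhile (· ≠ '_'))
termination_by s => s.length
decreasing_by
  all_goals (have := List.length_dropWhile_le (fun x => decide (x ≠ '_')) t; simp at this ⊢; try omega)

theorem pvSpl_decomp (t : List Char) :
    pvSpl t = t.takeWhile (· ≠ '_') ::
      (if t.dropWhile (· ≠ '_') = [] then [] else pvSpl ((t.dropWhile (· ≠ '_')).tail)) := by
  induction t with
  | nil => simp [pvSpl]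
  | cons c t ih =>
    by_cases hc : c = '_'
    · subst hc
      rw [pvSpl, if_pos rfl]
      simp [List.takeWhile_cons, List.dropWhile_cons]
    · rw [pvSpl, if_neg hc, ih]
      simp [List.takeWhile_cons, List.dropWhile_cons, hc]

theorem pvDropWhile_head (t : List Char) (d : Char) (r : List Char)
    (h : t.dropWhile (· ≠ '_') = d :: r) : d = '_' := by
  have := List.head?_dropWhile_not (fun x => decide (x ≠ '_')) t
  rw [h] at this
  simpa using this

theorem pvWords_eq_filter (s : List Char) :
    (pvSpl s).filter (fun p => !p.isEmpty) = pvWords s := by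
  induction s using pvWords.induct with
  | case1 => simp [pvSpl, pvWords]
  | case2 t ih =>
    rw [pvSpl, if_pos rfl, pvWords, if_pos rfl]
    simpa using ih
  | case3 c t hc ih =>
    rw [pvSpl_decomp (c :: t), pvWords, if_neg hc]
    have ht : (c :: t).takeWhile (· ≠ '_') = c :: t.takeWhile (· ≠ '_') := by
      simp [List.takeWhile_cons, hc]
    have hd2 : (c :: t).dropWhile (· ≠ '_') = t.dropWhile (· ≠ '_') := by
      simp [List.dropWhile_cons, hc]
    rw [ht, hd2, List.filter_cons]
    simp only [List.isEmpty_cons, Bool.not_false, if_true]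
    congr 1
    cases hd : t.dropWhile (· ≠ '_') with
    | nil =>
      simp only [hd, if_pos rfl]
      simp [pvWords]
    | cons d r =>
      have hd' : d = '_' := pvDropWhile_head t d r hd
      subst hd'
      rw [hd] at ih
      rw [if_neg (by simp), List.tail_cons]
      rw [pvSpl, if_pos rfl] at ih
      simp only [List.filter_cons, List.isEmpty_nil, Bool.not_true, Bool.false_eq_true,
        if_false] at ih
      exact ih

theorem pvRep2_takeDrop (t : List Char) :
    pvRep2 t = t.takeWhile (· ≠ '_') ++ pvRep2 (t.dropWhile (· ≠ '_')) := by
  induction t with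
  | nil => simp [pvRep2]
  | cons c t ih =>
    by_cases hc : c = '_'
    · subst hc; simp [List.takeWhile_cons, List.dropWhile_cons]
    · have hcond : ¬ (c = '_' ∧ t.head? = some '_') := fun h => hc h.1
      rw [pvRep2, if_neg hcond]
      simp [List.takeWhile_cons, List.dropWhile_cons, hc, ih]

theorem pvRep2_head (r : List Char) (hr : r.head? = some '_') :
    (pvRep2 r).head? = some '_' ∨ pvRep2 r = [] := by
  cases r with
  | nil => simp at hr
  | cons c t =>
    simp at hr
    subst hr
    rw [pvRep2]
    split_ifs <;> simp

theorem pvWords_rep2 (s : List Char) : pvWords (pvRep2 s) = pvWords s := by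
  induction hn : s.length using Nat.strong_induction_on generalizing s with
  | _ n ih =>
  subst hn
  match s with
  | [] => simp [pvRep2]
  | c :: t =>
    by_cases hc : c = '_'
    · subst hc
      rw [pvRep2]
      split_ifs with hcond
      · rw [pvWords, if_pos rfl, pvWords, if_pos rfl]
        obtain ⟨-, h2⟩ := hcond
        cases t with
        | nil => simp at h2
        | cons d t' =>
          simp at h2; subst h2
          simp only [List.tail_cons]
          rw [ih t'.length (by simp) t' rfl]
          rw [pvWords, if_pos rfl]
      · rw [pvWords, if_pos rfl, pvWords, if_pos rfl]
        exact ih t.length (by simp) t rfl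
    · have hcond : ¬ (c = '_' ∧ t.head? = some '_') := fun h => hc h.1
      rw [pvRep2, if_neg hcond]
      rw [pvWords, if_neg hc, pvWords, if_neg hc]
      have htd := pvRep2_takeDrop t
      set w := t.takeWhile (· ≠ '_') with hw
      set r := t.dropWhile (· ≠ '_') with hrr
      have hwall : ∀ x ∈ w, x ≠ '_' := by
        intro x hx
        have hall := List.all_takeWhile (p := fun x => decide (x ≠ '_')) (l := t)
        rw [← hw] at hall
        have := List.all_eq_true.mp hall x hx
        simpa using this
      have hrep_r : pvRep2 r = [] ∨ (pvRep2 r).head? = some '_' := by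
        cases hr : r with
        | nil => left; simp [pvRep2]
        | cons d rr =>
          have hd : d = '_' := pvDropWhile_head t d rr (by rw [← hrr, hr])
          subst hd
          rcases pvRep2_head ('_' :: rr) (by simp) with h | h
          · right; exact h
          · left; exact h
      have htake : (pvRep2 t).takeWhile (· ≠ '_') = w := by
        rw [htd, List.takeWhile_append]
        have hwtw : w.takeWhile (· ≠ '_') = w := List.takeWhile_eq_self_iff.mpr (by
          intro x hx; simpa using hwall x hx)
        rw [hwtw, if_pos rfl]
        rcases hrep_r with h | h
        · simp [h]
        · cases hp : pvRep2 r with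
          | nil => simp
          | cons e ee =>
            rw [hp] at h; simp at h; subst h
            simp [List.takeWhile_cons]
      have hdrop : (pvRep2 t).dropWhile (· ≠ '_') = pvRep2 r := by
        have hwdw : w.dropWhile (· ≠ '_') = [] := List.dropWhile_eq_nil_iff.mpr (by
          intro x hx; simpa using hwall x hx)
        rw [htd, List.dropWhile_append, hwdw, if_pos List.isEmpty_nil]
        rcases hrep_r with h | h
        · simp [h]
        · cases hp : pvRep2 r with
          | nil => simp
          | cons e ee =>
            rw [hp] at h; simp at h; subst h
            rw [List.dropWhile_cons]
            simp
      rw [htake, hdrop]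
      congr 1
      have hrlen : r.length < (c :: t).length := by
        have := List.length_dropWhile_le (fun x => decide (x ≠ '_')) t
        rw [← hrr] at this
        simp; omega
      exact ih r.length hrlen r rfl

theorem pvJoin_nil : PySem.Chars.join ['_'] [] = [] := by
  simp [PySem.Chars.join, List.intercalate]

theorem pvJoin_singleton (a : List Char) : PySem.Chars.join ['_'] [a] = a := by
  simp [PySem.Chars.join, List.intercalate]

theorem pvJoin_cons (a b : List Char) (l : List (List Char)) :
    PySem.Chars.join ['_'] (a :: b :: l) = a ++ '_' :: PySem.Chars.join ['_'] (b :: l) := by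
  simp [PySem.Chars.join, List.intercalate, List.intersperse]

theorem pvDropWhile_all_false (q : Char → Bool) (l : List Char) (h : ∀ x ∈ l, q x = false) :
    l.dropWhile q = l := by
  cases l with
  | nil => rfl
  | cons a t =>
    rw [List.dropWhile_cons, if_neg]
    simp [h a (by simp)]

theorem pvWords_ne_nil (e : Char) (r : List Char) (he : e ≠ '_') : pvWords (e :: r) ≠ [] := by
  rw [pvWords, if_neg he]
  simp

-- right strip of a string with no doubled underscore and no leading underscore is the join of its words
theorem pvRstrip_no2 (s : List Char) (h : ¬ ['_', '_'] <:+: s)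
    (hhd : ∀ d, s.head? = some d → d ≠ '_') :
    (List.dropWhile (fun c => c == '_') s.reverse).reverse = PySem.Chars.join ['_'] (pvWords s) := by
  induction hn : s.length using Nat.strong_induction_on generalizing s with
  | _ n ih =>
  subst hn
  match s with
  | [] => simp [pvWords, pvJoin_nil]
  | c :: t =>
    have hc : c ≠ '_' := hhd c (by simp)
    have htwd : t.takeWhile (· ≠ '_') ++ t.dropWhile (· ≠ '_') = t :=
      List.takeWhile_append_dropWhile
    have hwall : ∀ x ∈ (c :: t.takeWhile (· ≠ '_')), (x == '_') = false := by
      intro x hx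
      rcases List.mem_cons.mp hx with hx | hx
      · subst hx; simpa using hc
      · have hall := List.all_takeWhile (p := fun x => decide (x ≠ '_')) (l := t)
        have := List.all_eq_true.mp hall x hx
        simpa using this
    rw [pvWords, if_neg hc]
    cases hr : t.dropWhile (· ≠ '_') with
    | nil =>
      have ht : t = t.takeWhile (· ≠ '_') := by
        conv_lhs => rw [← htwd, hr, List.append_nil]
      rw [pvDropWhile_all_false _ _ (by
        intro x hx
        apply hwall
        rw [List.mem_reverse] at hx
        rcases List.mem_cons.mp hx with hx2 | hx2
        · simp [hx2]
        · rw [ht] at hx2; exact List.mem_cons_of_mem c hx2)]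
      rw [List.reverse_reverse, pvWords, pvJoin_singleton]
      nth_rewrite 1 [ht]
      rfl
    | cons d r' =>
      have hd : d = '_' := pvDropWhile_head t d r' hr
      subst hd
      have ht : t = t.takeWhile (· ≠ '_') ++ '_' :: r' := by
        conv_lhs => rw [← htwd, hr]
      cases hr' : r' with
      | nil =>
        subst hr'
        have hs : (c :: t).reverse = '_' :: ((t.takeWhile (· ≠ '_')).reverse ++ [c]) := by
          rw [List.reverse_cons]
          conv_lhs => rw [ht]
          simp
        rw [hs, List.dropWhile_cons, if_pos (by simp)]
        rw [pvDropWhile_all_false _ _ (by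
          intro x hx
          apply hwall
          rcases List.mem_append.mp hx with hx | hx
          · exact List.mem_cons_of_mem c (by simpa using hx)
          · simp at hx; simp [hx])]
        rw [pvWords, if_pos rfl, pvWords, pvJoin_singleton]
        simp
      | cons e r'' =>
        have he : e ≠ '_' := by
          intro he
          apply h
          subst he
          apply List.infix_cons
          rw [ht, hr']
          exact ⟨t.takeWhile (· ≠ '_'), r'', by simp⟩
        have hinf : ¬ ['_', '_'] <:+: r' := by
          intro hx
          apply h
          apply List.infix_cons
          rw [ht]
          exact hx.trans ⟨t.takeWhile (· ≠ '_') ++ ['_'], [], by simp⟩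
        have hlen : r'.length < (c :: t).length := by
          have hdle := List.length_dropWhile_le (fun x => decide (x ≠ '_')) t
          rw [hr] at hdle
          simp at hdle ⊢
          omega
        have hIH := ih r'.length hlen r' hinf (by
          intro d hdd
          rw [hr'] at hdd
          simp at hdd
          subst hdd
          exact he) rfl
        have hs : (c :: t).reverse =
            r'.reverse ++ ('_' :: ((t.takeWhile (· ≠ '_')).reverse ++ [c])) := by
          rw [List.reverse_cons]
          conv_lhs => rw [ht]
          simp
        rw [hs, List.dropWhile_append]
        rw [if_neg (by
          intro hemp
          have h1 := List.dropWhile_eq_nil_iff.mp (List.isEmpty_iff.mp hemp)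
          have h2 := h1 e (by rw [hr']; simp)
          simp [he] at h2)]
        rw [List.reverse_append]
        simp only [List.reverse_cons, List.reverse_append, List.reverse_reverse,
          List.reverse_nil, List.nil_append]
        rw [hIH]
        rw [hr']
        have hw2 : pvWords ('_' :: e :: r'') = pvWords (e :: r'') := by
          rw [pvWords, if_pos rfl]
        rw [hw2]
        cases hws : pvWords (e :: r'') with
        | nil => exact absurd hws (pvWords_ne_nil e r'' he)
        | cons a l =>
          rw [pvJoin_cons]
          simp

-- stripping edge underscores from a string with no doubled underscore yields the join of the words
theorem pvStrip_no2 (s : List Char) (h : ¬ ['_', '_'] <:+: s) :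
    PySem.Chars.stripChars s ['_'] = PySem.Chars.join ['_'] (pvWords s) := by
  have hpq : (fun c => (['_'] : List Char).contains c) = (fun c => c == '_') := by
    funext c
    by_cases hc : c = '_' <;> simp [hc]
  rw [PySem.Chars.stripChars]
  rw [hpq]
  cases s with
  | nil => simp [pvWords, pvJoin_nil]
  | cons c t =>
    by_cases hc : c = '_'
    · subst hc
      rw [List.dropWhile_cons, if_pos (by simp)]
      have hth : ∀ d, t.head? = some d → d ≠ '_' := by
        intro d hd he
        apply h
        subst he
        cases t with
        | nil => simp at hd
        | cons x t' =>
          simp at hd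
          subst hd
          exact ⟨[], t', by simp⟩
      have hdt : t.dropWhile (fun c => c == '_') = t := by
        cases t with
        | nil => rfl
        | cons d t' =>
          rw [List.dropWhile_cons, if_neg (by simp [hth d (by simp)])]
      rw [hdt, pvWords, if_pos rfl]
      exact pvRstrip_no2 t (fun hx => h (List.infix_cons hx)) hth
    · rw [List.dropWhile_cons, if_neg (by simpa using hc)]
      exact pvRstrip_no2 (c :: t) h (by intro d hd; simp at hd; subst hd; exact hc)

theorem pvCollapse_strip (s : List Char) :
    PySem.Chars.stripChars (pvCollapse s) ['_'] = PySem.Chars.join ['_'] (pvWords s) := by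
  rw [pvCollapse]
  split_ifs with h
  · rw [pvCollapse_strip (PySem.Chars.replace s ['_', '_'] ['_'])]
    rw [pvRep2_eq, pvWords_rep2]
  · exact pvStrip_no2 s (fun hi => h ((PySem.Chars.isIn_iff_infix _ _).mpr hi))
termination_by s.length
decreasing_by exact pvReplace_len_lt s h

-- ===== VERDICT (by name: the statement is the Claim_ definition above) =====
theorem normalize_segment_name_spec : Claim_equal_normalize_segment_name := by
  intro name remove_tokens _
  unfold Spec_normalize_segment_name normalize_segment_name normalize_segment_name_alt
  simp only [PySem.Str.stripChars]
  rw [pvSplitOn_eq, pvWords_eq_filter]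
  congr 1
  have h1 : (String.ofList (pvCollapse (pvTok name (remove_tokens.getD ["_npy"])).toList)).toList
      = pvCollapse (pvTok name (remove_tokens.getD ["_npy"])).toList := by simp
  rw [h1]
  have h2 : ("_" : String).toList = ['_'] := by decide
  rw [h2]
  exact pvCollapse_strip _
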